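-- pv_equiv track=rewrite | github.com/MicrobialDarkMatter/Fishnchips_basecaller | src/utils/assembler.py | trim_column
-- ===== SOURCE A (Python) =====
-- def trim_column(str_col):
--     m = -1
--     n = -1
--     for i,char in enumerate(str_col):
--         if char in 'actg_':
--             m = i
--             break
--     for i,char in reversed(list(enumerate(str_col))):
--         if char in 'actg_':
--             n = i
--             break
--     return str_col[m:n+1]
-- ===== SOURCE B (Python) =====
-- def trim_column(str_col):
--     first = -1
--     last = -1
--     for i, ch in enumerate(str_col):
--         if ch in 'actg_':
--             if first < 0:
--                 first = i
--             last = i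
--     if first < 0:
--         return ''
--     return str_col[first:last+1]
-- ===== Notes on version B (the rewrite author's own statement) =====
-- stated objective: simpler
-- what changed: Replaces A's two scans (a forward break loop plus a second loop over reversed(list(enumerate(...)))) with one forward pass that maintains both the first and the last matching index, returning the empty string directly when no character matches.
import Mathlib
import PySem

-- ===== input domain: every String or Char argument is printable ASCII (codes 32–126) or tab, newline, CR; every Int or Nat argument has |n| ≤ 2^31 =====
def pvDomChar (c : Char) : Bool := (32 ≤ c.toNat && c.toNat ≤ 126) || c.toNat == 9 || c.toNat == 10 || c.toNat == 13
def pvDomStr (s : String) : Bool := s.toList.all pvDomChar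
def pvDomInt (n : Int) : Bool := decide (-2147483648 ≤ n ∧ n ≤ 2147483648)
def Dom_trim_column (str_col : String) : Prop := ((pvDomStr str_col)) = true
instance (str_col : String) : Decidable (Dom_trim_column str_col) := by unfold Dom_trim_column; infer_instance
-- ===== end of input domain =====

-- B replaces A's two scans (forward break loop + loop over reversed(list(enumerate))) with one
-- forward pass maintaining both endpoints; objective: simpler.


-- ===== PORT A =====
-- `char in 'actg_'`
def pvIsBase (c : Char) : Bool := c = 'a' || c = 'c' || c = 't' || c = 'g' || c = '_'

-- A's `for i,char in …: if char in 'actg_': <var> = i; break` with the -1 initial value kept on no match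
def pvFirstMatch : List (Int × Char) → Int
  | [] => -1
  | (i, c) :: rest => if pvIsBase c then i else pvFirstMatch rest

def trim_column (str_col : String) : String :=
  let m := pvFirstMatch (PySem.List.enumerate str_col.toList)
  let n := pvFirstMatch (PySem.List.enumerate str_col.toList).reverse
  String.ofList (PySem.List.slice str_col.toList (some m) (some (n + 1)))

-- ===== PORT B =====
-- one step of B's single pass: set first on the first match, last on every match
def pvStep (acc : Int × Int) (p : Int × Char) : Int × Int :=
  if pvIsBase p.2 then (if acc.1 < 0 then p.1 else acc.1, p.1) else acc

def trim_column_alt (str_col : String) : String :=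
  let fl := (PySem.List.enumerate str_col.toList).foldl pvStep (-1, -1)
  if fl.1 < 0 then ""
  else String.ofList (PySem.List.slice str_col.toList (some fl.1) (some (fl.2 + 1)))

-- ===== PRECONDITION & SPEC =====
def Spec_trim_column (str_col : String) (out : String) : Prop := out = trim_column_alt str_col
instance (str_col : String) (out : String) : Decidable (Spec_trim_column str_col out) := by unfold Spec_trim_column; infer_instance

-- ===== CLAIM (what is proved, stated in full; the proofs are below) =====
def Claim_equal_trim_column : Prop := ∀ (str_col : String), Dom_trim_column str_col → Spec_trim_column str_col (trim_column str_col)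

-- ===== LEMMAS AND PROOFS =====

theorem pv_fold_keep (ps : List (Int × Char)) (f0 l0 : Int) (h : 0 ≤ f0) :
    (ps.foldl pvStep (f0, l0)).1 = f0 := by
  induction ps generalizing l0 with
  | nil => rfl
  | cons p rest ih =>
    simp only [List.foldl_cons, pvStep]
    split
    · simpa [show ¬ f0 < 0 by omega] using ih p.1
    · exact ih l0

theorem pv_fold_fst (ps : List (Int × Char)) (hpos : ∀ p ∈ ps, 0 ≤ p.1) (l0 : Int) :
    (ps.foldl pvStep (-1, l0)).1 = pvFirstMatch ps := by
  induction ps generalizing l0 with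
  | nil => rfl
  | cons p rest ih =>
    obtain ⟨i, c⟩ := p
    simp only [List.foldl_cons, pvStep, pvFirstMatch]
    split
    · simpa using pv_fold_keep rest i i (hpos (i, c) (by simp))
    · exact ih (fun q hq => hpos q (by simp [hq])) l0

theorem pv_fold_snd (ps : List (Int × Char)) (hpos : ∀ p ∈ ps, 0 ≤ p.1) (f0 l0 : Int) :
    (ps.foldl pvStep (f0, l0)).2 =
      if pvFirstMatch ps.reverse < 0 then l0 else pvFirstMatch ps.reverse := by
  induction ps using List.reverseRecOn with
  | nil => simp [pvFirstMatch]
  | append_singleton rest p ih =>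
    obtain ⟨i, c⟩ := p
    have hi : (0 : Int) ≤ i := hpos (i, c) (by simp)
    rw [List.foldl_append]
    simp only [List.foldl_cons, List.foldl_nil, List.reverse_append, List.reverse_cons,
      List.reverse_nil, List.nil_append, List.cons_append, pvStep, pvFirstMatch]
    split
    · simp [show ¬ i < 0 by omega]
    · exact ih (fun q hq => hpos q (by simp [hq]))

theorem pv_first_neg (ps : List (Int × Char)) (hpos : ∀ p ∈ ps, 0 ≤ p.1)
    (h : pvFirstMatch ps < 0) : ∀ p ∈ ps, pvIsBase p.2 = false := by
  induction ps with
  | nil => simp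
  | cons p rest ih =>
    obtain ⟨i, c⟩ := p
    intro q hq
    by_cases hb : pvIsBase c
    · exfalso
      have hi : (0 : Int) ≤ i := hpos (i, c) (by simp)
      simp [pvFirstMatch, hb] at h
      omega
    · rcases List.mem_cons.mp hq with h1 | h1
      · simpa [h1] using hb
      · exact ih (fun r hr => hpos r (by simp [hr])) (by simpa [pvFirstMatch, hb] using h) q h1

theorem pv_first_of_all_false (ps : List (Int × Char))
    (h : ∀ p ∈ ps, pvIsBase p.2 = false) : pvFirstMatch ps = -1 := by
  induction ps with
  | nil => rfl
  | cons p rest ih =>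
    simp [pvFirstMatch, h p (by simp), ih (fun q hq => h q (by simp [hq]))]

theorem pv_enum_pos (xs : List Char) :
    ∀ p ∈ PySem.List.enumerate xs, 0 ≤ p.1 := by
  intro p hp
  rcases (PySem.List.mem_enumerate_iff xs 0 p).mp hp with ⟨k, hk, rfl⟩
  simp

theorem pv_slice_neg_one_zero (xs : List Char) :
    PySem.List.slice xs (some (-1)) (some 0) = [] := by
  apply List.eq_nil_of_length_eq_zero
  rw [PySem.List.length_slice]
  have h0 : PySem.List.clampIdx xs.length (0 : Int) = 0 := by
    simp
  rw [h0]
  omega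

-- ===== VERDICT (by name: the statement is the Claim_ definition above) =====
theorem trim_column_spec : Claim_equal_trim_column := by
  intro s _
  unfold Spec_trim_column trim_column trim_column_alt
  set xs := s.toList with hxs
  set ps := PySem.List.enumerate xs with hps
  have hpos := pv_enum_pos xs
  have hfst := pv_fold_fst ps hpos (-1)
  have hsnd := pv_fold_snd ps hpos (-1) (-1)
  by_cases hneg : (ps.foldl pvStep (-1, -1)).1 < 0
  · -- no match: A computes xs[-1:0] = [], B returns ""
    have hm : pvFirstMatch ps < 0 := by rw [← hfst]; exact hneg
    have hall := pv_first_neg ps hpos hm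
    have hm1 : pvFirstMatch ps = -1 :=
      pv_first_of_all_false ps hall
    have hn1 : pvFirstMatch ps.reverse = -1 :=
      pv_first_of_all_false ps.reverse (fun p hp => hall p (List.mem_reverse.mp hp))
    simp only [hneg, if_true, hm1, hn1]
    rw [show (-1 : Int) + 1 = 0 by ring, pv_slice_neg_one_zero]
  · -- a match exists: both return xs[first:last+1]
    have hm : pvFirstMatch ps = (ps.foldl pvStep (-1, -1)).1 := hfst.symm
    have hnpos : ¬ pvFirstMatch ps.reverse < 0 := by
      intro hlt
      have hall := pv_first_neg ps.reverse
        (fun p hp => hpos p (List.mem_reverse.mp hp)) hlt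
      have : pvFirstMatch ps = -1 :=
        pv_first_of_all_false ps (fun p hp => hall p (by simpa using hp))
      omega
    have hn : pvFirstMatch ps.reverse = (ps.foldl pvStep (-1, -1)).2 := by
      rw [hsnd, if_neg hnpos]
    simp only [hneg, if_false, hm, hn]
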